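-- pv_equiv track=rewrite | github.com/thaisbviana/intro-cpscience | Curso 2/Week 6/soma_lista_recursivo.py | soma_lista
-- ===== SOURCE A (Python) =====
-- def soma_lista(lista):
--     inicio = lista[0]
--
--     if len(lista) == 0:
--         return False
--
--     if len(lista) == 1:
--         return inicio
--     else:
--         return inicio + soma_lista(lista[1:])
-- ===== SOURCE B (Python) =====
-- def soma_lista(lista):
--     total = 0
--     for x in lista:
--         total += x
--     return total
-- ===== Notes on version B (the rewrite author's own statement) =====
-- stated objective: faster
-- what changed: Replaced the recursion with quadratic list slicing by a single iterative accumulation pass.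
-- outside the precondition, e.g. on soma_lista([]): A raises IndexError, B returns 0
import Mathlib
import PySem

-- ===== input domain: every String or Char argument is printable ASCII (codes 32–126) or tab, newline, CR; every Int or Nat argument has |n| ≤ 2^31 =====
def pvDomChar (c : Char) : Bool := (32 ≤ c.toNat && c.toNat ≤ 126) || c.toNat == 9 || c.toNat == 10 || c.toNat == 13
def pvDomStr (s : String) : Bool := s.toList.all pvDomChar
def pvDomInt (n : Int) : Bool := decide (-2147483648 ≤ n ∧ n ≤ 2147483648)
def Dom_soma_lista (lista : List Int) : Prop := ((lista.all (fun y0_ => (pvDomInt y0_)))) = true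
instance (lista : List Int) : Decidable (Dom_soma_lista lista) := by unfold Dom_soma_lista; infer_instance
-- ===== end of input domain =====

-- B replaces A's recursive slicing (quadratic) by a single iterative accumulation pass (linear); on the empty list A raises IndexError while B returns the empty sum (excluded by Pre_).


-- ===== PORT A =====
-- A: inicio = first element (IndexError when empty), len==1 → inicio, else inicio + soma_lista(lista[1:])
def soma_lista (lista : List Int) : Int :=
  match lista with
  | [] => 0            -- Python raises IndexError here; excluded by Pre_
  | [inicio] => inicio
  | inicio :: rest => inicio + soma_lista rest

-- ===== PORT B =====
-- B: iterative accumulation (total = 0; for x in lista: total += x)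
def soma_lista_alt (lista : List Int) : Int :=
  lista.foldl (fun total x => total + x) 0

-- ===== PRECONDITION & SPEC =====
-- A reads the first element before its length check, so it raises IndexError when the list is empty; Pre_ excludes the empty list.
def Pre_soma_lista (lista : List Int) : Prop := lista ≠ []
instance (lista : List Int) : Decidable (Pre_soma_lista lista) := by unfold Pre_soma_lista; infer_instance
def pvWitness_soma_lista : List Int := ([1, 2, 3])

def Spec_soma_lista (lista : List Int) (out : Int) : Prop := out = soma_lista_alt lista
instance (lista : List Int) (out : Int) : Decidable (Spec_soma_lista lista out) := by unfold Spec_soma_lista; infer_instance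

-- ===== CLAIM (what is proved, stated in full; the proofs are below) =====
def Claim_equal_soma_lista : Prop := ∀ (lista : List Int), Dom_soma_lista lista → Pre_soma_lista lista → Spec_soma_lista lista (soma_lista lista)

-- ===== LEMMAS AND PROOFS =====
theorem foldl_add_acc (l : List Int) (a : Int) :
    l.foldl (fun total x => total + x) a = a + l.foldl (fun total x => total + x) 0 := by
  induction l generalizing a with
  | nil => simp
  | cons y ys ih =>
    simp only [List.foldl_cons]
    rw [ih (a + y), ih (0 + y)]
    ring

theorem soma_eq (lista : List Int) (h : lista ≠ []) :
    soma_lista lista = soma_lista_alt lista := by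
  induction lista with
  | nil => exact absurd rfl h
  | cons x xs ih =>
    cases xs with
    | nil => simp [soma_lista, soma_lista_alt]
    | cons y ys =>
      simp only [soma_lista, soma_lista_alt, List.foldl_cons]
      rw [ih (by simp), soma_lista_alt]
      simp only [List.foldl_cons]
      rw [foldl_add_acc ys (0 + y), foldl_add_acc ys (0 + x + y)]
      ring

-- ===== VERDICT (by name: the statement is the Claim_ definition above) =====
theorem soma_lista_spec : Claim_equal_soma_lista := by
  intro lista _ hpre
  exact soma_eq lista hpre
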